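-- pv_equiv track=rewrite | github.com/kelvin-273/pyragene | eugene/solvers/base_min_crossings_wedges.py | default_wedges
-- ===== SOURCE A (Python) =====
-- from typing import List
--
-- def default_wedges(dist_arr: List[int], *args, **kwargs) -> (int, List[bool]):
--     n_loci = len(dist_arr)
--     out_selection = [i % 2 == 0 for i in range(n_loci - 1)]
--     n_repeats = sum(
--         any(
--             (dist_arr[i] == dist_arr[j] and dist_arr[i + 1] == dist_arr[j + 1])
--             or (dist_arr[i] == dist_arr[j + 1] and dist_arr[i + 1] == dist_arr[j])
--             for j in range(0, i, 2)
--         )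
--         for i in range(2, n_loci - 1, 2)
--     )
--     return n_repeats, out_selection
-- ===== SOURCE B (Python) =====
-- from typing import List
--
-- def default_wedges(dist_arr: List[int], *args, **kwargs) -> (int, List[bool]):
--     m = max(len(dist_arr) - 1, 0)
--     out_selection = ([True, False] * ((m + 1) // 2))[:m]
--     n_repeats = _count_repeats(dist_arr, set())
--     return n_repeats, out_selection
--
-- def _count_repeats(xs, seen):
--     if len(xs) < 2:
--         return 0
--     a, b = xs[0], xs[1]
--     key = (a, b) if a <= b else (b, a)
--     rest = xs[2:]
--     if key in seen:
--         return 1 + _count_repeats(rest, seen)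
--     seen.add(key)
--     return _count_repeats(rest, seen)
-- ===== Notes on version B (the rewrite author's own statement) =====
-- stated objective: faster
-- what changed: Replaces A's quadratic index-range scan over all earlier even positions with a single recursive pass that consumes the list two elements at a time, normalizing each pair and counting hits against a growing seen-set; out_selection is built by replicating the [True, False] pattern and truncating instead of mapping a parity test over a range.
import Mathlib
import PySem

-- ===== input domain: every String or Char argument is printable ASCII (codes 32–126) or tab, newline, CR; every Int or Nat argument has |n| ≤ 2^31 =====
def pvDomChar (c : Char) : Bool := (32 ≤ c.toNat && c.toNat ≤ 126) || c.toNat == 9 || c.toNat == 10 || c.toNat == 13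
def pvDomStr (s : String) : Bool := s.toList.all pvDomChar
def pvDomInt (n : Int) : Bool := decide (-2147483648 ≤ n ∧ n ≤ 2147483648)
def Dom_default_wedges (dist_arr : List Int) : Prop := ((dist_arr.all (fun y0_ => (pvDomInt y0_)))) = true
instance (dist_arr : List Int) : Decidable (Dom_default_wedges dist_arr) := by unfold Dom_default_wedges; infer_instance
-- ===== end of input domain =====

-- B replaces A's quadratic scan over earlier even positions by one recursive pass that eats the
-- list two elements at a time with a seen-set, and builds out_selection by pattern replication: faster.

-- ===== PORT A =====
def default_wedges (dist_arr : List Int) : Int × List Bool :=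
  let n_loci : Int := dist_arr.length
  let out_selection : List Bool :=
    (PySem.List.pyRange 0 (n_loci - 1) 1).map (fun i => PySem.Int.mod i 2 == 0)
  let n_repeats : Int :=
    ((PySem.List.pyRange 2 (n_loci - 1) 2).map (fun i =>
      if (PySem.List.pyRange 0 i 2).any (fun j =>
          (PySem.List.pyGetD dist_arr i 0 == PySem.List.pyGetD dist_arr j 0
            && PySem.List.pyGetD dist_arr (i + 1) 0 == PySem.List.pyGetD dist_arr (j + 1) 0)
          || (PySem.List.pyGetD dist_arr i 0 == PySem.List.pyGetD dist_arr (j + 1) 0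
            && PySem.List.pyGetD dist_arr (i + 1) 0 == PySem.List.pyGetD dist_arr j 0))
      then (1 : Int) else 0)).sum
  (n_repeats, out_selection)

-- ===== PORT B =====
-- helper _count_repeats of Source B: recursion on the list, two elements at a time, threading the seen-set
def pvCountRepeats : List Int → PySem.Set (Int × Int) → Int
  | a :: b :: rest, seen =>
    let key : Int × Int := if a ≤ b then (a, b) else (b, a)
    if PySem.Set.contains seen key then 1 + pvCountRepeats rest seen
    else pvCountRepeats rest (PySem.Set.add seen key)
  | _, _ => 0

def default_wedges_alt (dist_arr : List Int) : Int × List Bool :=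
  let m : Nat := dist_arr.length - 1
  let out_selection : List Bool :=
    (List.flatten (List.replicate ((m + 1) / 2) [true, false])).take m
  let n_repeats : Int := pvCountRepeats dist_arr PySem.Set.empty
  (n_repeats, out_selection)

-- ===== PRECONDITION & SPEC =====
def Spec_default_wedges (dist_arr : List Int) (out : Int × List Bool) : Prop := out = default_wedges_alt dist_arr
instance (dist_arr : List Int) (out : Int × List Bool) : Decidable (Spec_default_wedges dist_arr out) := by unfold Spec_default_wedges; infer_instance

-- ===== CLAIM (what is proved, stated in full; the proofs are below) =====
def Claim_equal_default_wedges : Prop := ∀ (dist_arr : List Int), Dom_default_wedges dist_arr → Spec_default_wedges dist_arr (default_wedges dist_arr)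

-- ===== LEMMAS AND PROOFS =====

-- the normalized pair at even position 2k (proof-side abbreviation)
def pvPairAt (xs : List Int) (k : Nat) : Int × Int :=
  (min (PySem.List.pyGetD xs (2 * (k : Int)) 0) (PySem.List.pyGetD xs (2 * (k : Int) + 1) 0),
   max (PySem.List.pyGetD xs (2 * (k : Int)) 0) (PySem.List.pyGetD xs (2 * (k : Int) + 1) 0))

-- the list of normalized pairs B walks through, in B's order (proof-side)
def pvPairsOf : List Int → List (Int × Int)
  | a :: b :: rest => (if a ≤ b then (a, b) else (b, a)) :: pvPairsOf rest
  | _ => []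

-- A's unordered-pair test is equality of the (min,max) normal forms
theorem pvPairKey (a b c d : Int) :
    ((a = c ∧ b = d) ∨ (a = d ∧ b = c)) ↔ (min a b, max a b) = (min c d, max c d) := by
  simp only [Prod.mk.injEq]
  omega

-- counting positions that duplicate an earlier one = length minus number of distinct values
theorem pvCountDups (h : Nat → Int × Int) (K : Nat) :
    ((List.range K).map (fun k =>
        if h (k + 1) ∈ (List.range (k + 1)).map h then (1 : Int) else 0)).sum
      = ((K + 1 : Nat) : Int) - ((PySem.Set.ofList ((List.range (K + 1)).map h)).length : Int) := by
  induction K with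
  | zero => simp [PySem.Set.ofList]
  | succ K ih =>
    rw [List.range_succ, List.map_append, List.sum_append]
    rw [show List.range (K + 1 + 1) = List.range (K + 1) ++ [K + 1] from List.range_succ,
        List.map_append]
    simp only [List.map_singleton, List.sum_singleton]
    rw [PySem.Set.ofList_append_singleton, PySem.Set.add_eq_ite]
    by_cases hmem : h (K + 1) ∈ (List.range (K + 1)).map h
    · have hmem' : h (K + 1) ∈ PySem.Set.ofList ((List.range (K + 1)).map h) :=
        (PySem.Set.mem_ofList _ _).mpr hmem
      rw [if_pos hmem, if_pos hmem', ih]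
      push_cast; ring
    · have hmem' : h (K + 1) ∉ PySem.Set.ofList ((List.range (K + 1)).map h) := by
        intro hc; exact hmem ((PySem.Set.mem_ofList _ _).mp hc)
      rw [if_neg hmem, if_neg hmem', ih, List.length_append]
      simp only [List.length_singleton]
      push_cast; ring

-- A's inner `any` over earlier even positions is membership of the normalized pair
theorem pvInnerAny (xs : List Int) (k : Nat) :
    ((PySem.List.pyRange 0 (2 + 2 * (k : Int)) 2).any (fun j =>
        (PySem.List.pyGetD xs (2 + 2 * (k : Int)) 0 == PySem.List.pyGetD xs j 0
          && PySem.List.pyGetD xs (2 + 2 * (k : Int) + 1) 0 == PySem.List.pyGetD xs (j + 1) 0)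
        || (PySem.List.pyGetD xs (2 + 2 * (k : Int)) 0 == PySem.List.pyGetD xs (j + 1) 0
          && PySem.List.pyGetD xs (2 + 2 * (k : Int) + 1) 0 == PySem.List.pyGetD xs j 0)) = true)
      ↔ pvPairAt xs (k + 1) ∈ (List.range (k + 1)).map (pvPairAt xs) := by
  rw [PySem.List.pyRange_of_pos 0 (2 + 2 * (k : Int)) (by norm_num)]
  have hK : (if (0 : Int) < 2 + 2 * (k : Int) then ((2 + 2 * (k : Int) - 0 + 2 - 1) / 2).toNat else 0)
      = k + 1 := by
    rw [if_pos (by positivity)]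
    omega
  rw [hK, List.any_map, List.any_eq_true, List.mem_map]
  have e1 : 2 * (((k + 1 : Nat)) : Int) = 2 + 2 * (k : Int) := by push_cast; ring
  refine exists_congr fun j => and_congr_right fun _ => ?_
  simp only [Function.comp, Bool.or_eq_true, Bool.and_eq_true, beq_iff_eq, zero_add]
  rw [Iff.comm, eq_comm]
  constructor
  · intro heq
    apply (pvPairKey _ _ _ _).mpr
    simp only [pvPairAt, e1] at heq
    exact heq
  · intro hc
    have := (pvPairKey _ _ _ _).mp hc
    simp only [pvPairAt, e1]
    exact this

-- B's recursive pass counts |pairs| minus the growth of the seen-set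
theorem pvCR_additive : ∀ (xs : List Int) (seen : PySem.Set (Int × Int)),
    pvCountRepeats xs seen + (((pvPairsOf xs).foldl PySem.Set.add seen).length : Int)
      = ((pvPairsOf xs).length : Int) + (seen.length : Int) := by
  intro xs
  induction xs using pvPairsOf.induct with
  | case1 a b rest ih =>
    intro seen
    simp only [pvCountRepeats, pvPairsOf, List.foldl_cons, List.length_cons]
    set key := if a ≤ b then (a, b) else (b, a) with hkey
    by_cases hm : key ∈ seen
    · have hc : PySem.Set.contains seen key = true := (PySem.Set.contains_iff seen key).mpr hm
      have hadd : PySem.Set.add seen key = seen := by rw [PySem.Set.add_eq_ite, if_pos hm]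
      rw [if_pos hc, hadd]
      have := ih seen
      push_cast at this ⊢
      omega
    · have hc : PySem.Set.contains seen key = false := by
        rw [Bool.eq_false_iff]; intro h; exact hm ((PySem.Set.contains_iff seen key).mp h)
      have hadd : PySem.Set.add seen key = seen ++ [key] := by rw [PySem.Set.add_eq_ite, if_neg hm]
      rw [hc]
      simp only [Bool.false_eq_true, if_false]
      rw [hadd]
      have := ih (seen ++ [key])
      simp only [List.length_append, List.length_singleton] at this
      push_cast at this ⊢
      omega
  | case2 t ht =>
    intro seen
    match t, ht with
    | [], _ => simp [pvCountRepeats, pvPairsOf]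
    | [x], _ => simp [pvCountRepeats, pvPairsOf]
    | a :: b :: r, ht => exact absurd rfl (ht a b r)

theorem pvPairAt_shift (a b : Int) (r : List Int) (k : Nat) :
    pvPairAt (a :: b :: r) (k + 1) = pvPairAt r k := by
  have h1 : 2 * (((k + 1 : Nat)) : Int) = (((2 * k + 2 : Nat)) : Int) := by push_cast; ring
  have h2 : (((2 * k + 2 : Nat)) : Int) + 1 = (((2 * k + 3 : Nat)) : Int) := by push_cast; ring
  have h3 : 2 * ((k : Nat) : Int) = (((2 * k : Nat)) : Int) := by push_cast; ring
  have h4 : (((2 * k : Nat)) : Int) + 1 = (((2 * k + 1 : Nat)) : Int) := by push_cast; ring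
  simp only [pvPairAt, h1, h2, h3, h4, PySem.List.pyGetD_natCast]
  have e2 : 2 * k + 2 = (2 * k) + 1 + 1 := by omega
  have e3 : 2 * k + 3 = (2 * k + 1) + 1 + 1 := by omega
  rw [e2, e3]
  simp [List.getD]

theorem pvPairsOf_eq (xs : List Int) :
    pvPairsOf xs = (List.range (xs.length / 2)).map (pvPairAt xs) := by
  induction xs using pvPairsOf.induct with
  | case1 a b rest ih =>
    have hl : (a :: b :: rest).length / 2 = rest.length / 2 + 1 := by
      simp [List.length_cons]; omega
    rw [pvPairsOf, hl, List.range_succ_eq_map, List.map_cons, List.map_map]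
    have hb : PySem.List.pyGetD (a :: b :: rest) 1 0 = b := by
      rw [show ((1 : Int)) = (((1 : Nat)) : Int) from rfl, PySem.List.pyGetD_natCast]
      rfl
    have h0 : pvPairAt (a :: b :: rest) 0 = (if a ≤ b then (a, b) else (b, a)) := by
      simp only [pvPairAt, Nat.cast_zero, mul_zero, zero_add, PySem.List.pyGetD_zero_cons, hb]
      split_ifs with h <;> simp [min_def, max_def, h]
    rw [h0, ih]
    congr 1
    apply List.map_congr_left
    intro k _
    simp only [Function.comp_apply]
    exact (pvPairAt_shift a b rest k).symm
  | case2 t ht =>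
    match t, ht with
    | [], _ => simp [pvPairsOf]
    | [x], _ => simp [pvPairsOf]
    | a :: b :: r, ht => exact absurd rfl (ht a b r)

theorem pvAltSel : ∀ (q m : Nat), m ≤ 2 * q →
    (List.flatten (List.replicate q [true, false])).take m
      = (List.range m).map (fun k => decide (k % 2 = 0)) := by
  intro q
  induction q with
  | zero => intro m hm; interval_cases m; simp
  | succ q ih =>
    intro m hm
    match m with
    | 0 => simp
    | 1 => simp [List.replicate_succ]
    | (k + 2) =>
      rw [List.replicate_succ, List.flatten_cons]
      show true :: false :: (List.flatten (List.replicate q [true, false])).take k = _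
      rw [ih k (by omega)]
      rw [show k + 2 = (k + 1) + 1 from rfl, List.range_succ_eq_map, List.range_succ_eq_map]
      simp only [List.map_cons, List.map_map]
      norm_num
      intro a _
      omega

-- ===== VERDICT (by name: the statement is the Claim_ definition above) =====
theorem default_wedges_spec : Claim_equal_default_wedges := by
  intro xs _
  unfold Spec_default_wedges default_wedges default_wedges_alt
  dsimp only
  simp only [Prod.mk.injEq]
  constructor
  · -- the repeat counts agree
    have hB : pvCountRepeats xs PySem.Set.empty
        = ((pvPairsOf xs).length : Int) - ((PySem.Set.ofList (pvPairsOf xs)).length : Int) := by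
      have h := pvCR_additive xs PySem.Set.empty
      have he : (PySem.Set.empty : PySem.Set (Int × Int)) = [] := rfl
      rw [PySem.Set.ofList_eq_foldl, he]
      rw [he] at h
      simp only [List.length_nil, Nat.cast_zero, add_zero] at h
      omega
    rw [hB, pvPairsOf_eq, List.length_map, List.length_range]
    rw [PySem.List.pyRange_of_pos 2 ((xs.length : Int) - 1) (s := 2) (by norm_num), List.map_map]
    simp only [Function.comp_def]
    simp only [pvInnerAny]
    by_cases h1 : 2 ≤ xs.length
    · have hK : xs.length / 2
          = (if (2 : Int) < (xs.length : Int) - 1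
              then (((xs.length : Int) - 1 - 2 + 2 - 1) / 2).toNat else 0) + 1 := by
        split_ifs <;> omega
      rw [hK, pvCountDups (pvPairAt xs)]
    · have hKA : (if (2 : Int) < (xs.length : Int) - 1
          then (((xs.length : Int) - 1 - 2 + 2 - 1) / 2).toNat else 0) = 0 := by
        rw [if_neg (by omega)]
      have hK0 : xs.length / 2 = 0 := by omega
      rw [hKA, hK0]
      simp [PySem.Set.ofList]
  · -- the selection lists agree
    rw [PySem.List.pyRange_one 0 ((xs.length : Int) - 1), List.map_map]
    have hm : ((xs.length : Int) - 1 - 0).toNat = xs.length - 1 := by omega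
    rw [pvAltSel ((xs.length - 1 + 1) / 2) (xs.length - 1) (by omega), hm]
    apply List.map_congr_left
    intro k _
    simp only [Function.comp_apply, zero_add]
    rw [show ((2 : Int)) = (((2 : Nat)) : Int) from rfl, PySem.Int.mod_natCast]
    by_cases h : k % 2 = 0
    · simp [h]
    · have h' : ¬ ((k : Int)) % 2 = 0 := by omega
      simp [h, h']
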